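-- pv_equiv track=rewrite | github.com/mfaulk/deep_learning_examples | src/model_selection/configuration_space.py | generate_configurations
-- ===== SOURCE A (Python) =====
-- import itertools
-- from typing import List, Tuple
--
-- def generate_configurations(min_depth: int, max_depth: int, widths: List[int]) -> List[List[int]]:
--     """
--     Generate all possible neural network configurations given a range of depths and widths.
--
--     Parameters:
--     min_depth (int): Minimum number of layers in the neural network.
--     max_depth (int): Maximum number of layers in the neural network.
--     widths (List[int]): List of integers specifying possible layer widths.
--
--     Returns:
--     List[List[int]]: A list containing all possible configurations. Each configuration is represented as a list of integers, where each integer specifies the number of neurons in a layer.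
--     """
--
--     # min_depth <= max_depth
--     if min_depth > max_depth:
--         raise ValueError("min_depth must be less than or equal to max_depth.")
--
--     all_configurations: List[Tuple[int, ...]] = []
--
--     for depth in range(min_depth, max_depth + 1):
--         layer_ranges = [widths] * depth
--         configurations = itertools.product(*layer_ranges)
--         all_configurations.extend(configurations)
--
--     # Convert tuples to lists
--     return [list(config) for config in all_configurations]
-- ===== SOURCE B (Python) =====
-- from typing import List
--
--
-- def _configs(widths: List[int], d: int) -> List[List[int]]:
--     """All length-d configurations, lexicographic, by divide and conquer."""
--     if d <= 0:
--         return [[]]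
--     if d == 1:
--         return [[w] for w in widths]
--     h = d // 2
--     hi = _configs(widths, d - h)   # first d-h positions (more significant)
--     lo = _configs(widths, h)       # last h positions
--     return [x + y for x in hi for y in lo]
--
--
-- def generate_configurations(min_depth: int, max_depth: int, widths: List[int]) -> List[List[int]]:
--     if min_depth > max_depth:
--         raise ValueError("min_depth must be less than or equal to max_depth.")
--     all_configurations: List[List[int]] = []
--     for depth in range(min_depth, max_depth + 1):
--         all_configurations.extend(_configs(widths, depth))
--     return all_configurations
-- ===== Notes on version B (the rewrite author's own statement) =====
-- stated objective: alternative
-- what changed: Replaces the itertools.product call and the tuple-to-list conversion pass with a divide-and-conquer construction: the depth-d configurations are built by concatenating the configurations of the two halves of the depth.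
import Mathlib
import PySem

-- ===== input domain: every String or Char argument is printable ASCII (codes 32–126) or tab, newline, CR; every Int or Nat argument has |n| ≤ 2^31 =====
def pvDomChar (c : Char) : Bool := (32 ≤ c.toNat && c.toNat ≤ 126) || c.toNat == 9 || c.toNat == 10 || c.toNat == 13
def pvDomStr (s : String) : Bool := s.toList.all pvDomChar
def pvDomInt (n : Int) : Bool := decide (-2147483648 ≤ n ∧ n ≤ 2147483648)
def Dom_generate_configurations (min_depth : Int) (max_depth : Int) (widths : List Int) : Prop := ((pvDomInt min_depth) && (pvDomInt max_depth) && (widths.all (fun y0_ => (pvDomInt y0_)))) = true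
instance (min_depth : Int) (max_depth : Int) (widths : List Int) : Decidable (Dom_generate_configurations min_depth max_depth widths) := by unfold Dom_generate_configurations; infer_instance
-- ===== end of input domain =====

-- B replaces itertools.product with divide-and-conquer doubling (depth-d configurations are
-- concatenations of the two halves' configurations): a different algorithm; return-value equivalence only.

-- ===== PORT A =====
-- itertools.product(*[widths]*depth), ported as the standard front-recursion over the factor list
def pvProdA (ls : List (List Int)) : List (List Int) :=
  match ls with
  | [] => [[]]
  | l :: rest => l.flatMap (fun a => (pvProdA rest).map (fun t => a :: t))

def generate_configurations (min_depth : Int) (max_depth : Int) (widths : List Int) : List (List Int) :=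
  if min_depth > max_depth then []  -- Python raises ValueError here (outside Pre_)
  else
    let all_configurations :=
      (PySem.List.pyRange min_depth (max_depth + 1) 1).foldl
        (fun acc depth => acc ++ pvProdA (List.replicate depth.toNat widths)) []
    all_configurations.map (fun config => config)   -- the tuple→list conversion pass

-- ===== PORT B =====
-- _configs(widths, d): all length-d configurations, lexicographic, by divide and conquer
-- (d ≤ 0 in Python ↔ the Nat argument is 0 here; the Int depth is passed as depth.toNat below;
-- fuel only makes the halving recursion structural: fuel ≥ depth at every call, so the
-- fuel-exhausted branch is unreachable)
def pvConfigsGo (widths : List Int) : Nat → Nat → List (List Int)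
  | _, 0 => [[]]
  | _, 1 => widths.map (fun w => [w])
  | 0, _ + 2 => [[]]  -- unreachable
  | fuel + 1, d + 2 =>
    let h := (d + 2) / 2
    (pvConfigsGo widths fuel (d + 2 - h)).flatMap
      (fun x => (pvConfigsGo widths fuel h).map (fun y => x ++ y))

def pvConfigs (widths : List Int) (d : Nat) : List (List Int) :=
  pvConfigsGo widths d d

def generate_configurations_alt (min_depth : Int) (max_depth : Int) (widths : List Int) : List (List Int) :=
  if min_depth > max_depth then []  -- B raises ValueError here too (outside Pre_)
  else
    (PySem.List.pyRange min_depth (max_depth + 1) 1).foldl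
      (fun acc depth => acc ++ pvConfigs widths depth.toNat) []

-- ===== PRECONDITION & SPEC =====
-- Pre_ excludes exactly the inputs on which A raises ValueError (min_depth > max_depth).
def Pre_generate_configurations (min_depth : Int) (max_depth : Int) (widths : List Int) : Prop :=
  min_depth ≤ max_depth
instance (min_depth : Int) (max_depth : Int) (widths : List Int) : Decidable (Pre_generate_configurations min_depth max_depth widths) := by unfold Pre_generate_configurations; infer_instance
def pvWitness_generate_configurations : Int × Int × List Int := (0, 2, [1, 2])

def Spec_generate_configurations (min_depth : Int) (max_depth : Int) (widths : List Int) (out : List (List Int)) : Prop := out = generate_configurations_alt min_depth max_depth widths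
instance (min_depth : Int) (max_depth : Int) (widths : List Int) (out : List (List Int)) : Decidable (Spec_generate_configurations min_depth max_depth widths out) := by unfold Spec_generate_configurations; infer_instance

-- ===== CLAIM (what is proved, stated in full; the proofs are below) =====
def Claim_equal_generate_configurations : Prop := ∀ (min_depth : Int) (max_depth : Int) (widths : List Int), Dom_generate_configurations min_depth max_depth widths → Pre_generate_configurations min_depth max_depth widths → Spec_generate_configurations min_depth max_depth widths (generate_configurations min_depth max_depth widths)

-- ===== LEMMAS AND PROOFS =====

-- [[a]] for each element, phrased as a map
theorem pv_flatMap_single_aux (l : List Int) :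
    l.flatMap (fun a => [[a]]) = l.map (fun a => [a]) := by
  induction l with
  | nil => rfl
  | cons w ws ih => simp [List.flatMap_cons, ih]

-- splitting the product of a + b copies of widths at position a
theorem pv_prodA_add (widths : List Int) (a b : Nat) :
    pvProdA (List.replicate (a + b) widths)
      = (pvProdA (List.replicate a widths)).flatMap
          (fun x => (pvProdA (List.replicate b widths)).map (fun y => x ++ y)) := by
  induction a with
  | zero => simp [pvProdA]
  | succ a ih =>
    rw [Nat.succ_add, List.replicate_succ, List.replicate_succ]
    show widths.flatMap (fun w => (pvProdA (List.replicate (a + b) widths)).map (fun t => w :: t))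
        = (widths.flatMap (fun w => (pvProdA (List.replicate a widths)).map (fun t => w :: t))).flatMap _
    rw [ih]
    simp [List.flatMap_assoc, List.flatMap_map, List.map_flatMap, List.map_map,
      Function.comp_def]

-- the divide-and-conquer construction enumerates the same product, in the same order
theorem pv_configsGo_eq (widths : List Int) (fuel : Nat) :
    ∀ d : Nat, d ≤ fuel → pvConfigsGo widths fuel d = pvProdA (List.replicate d widths) := by
  induction fuel with
  | zero =>
    intro d hd
    have hd0 : d = 0 := by omega
    subst hd0
    rfl
  | succ fuel ih =>
    intro d hd
    match d with
    | 0 => rfl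
    | 1 =>
      show widths.map (fun w => [w]) = pvProdA (List.replicate (0 + 1) widths)
      rw [List.replicate_succ, List.replicate_zero]
      show _ = widths.flatMap (fun a => [[]].map (fun t => a :: t))
      simp [pv_flatMap_single_aux]
    | d + 2 =>
      show (pvConfigsGo widths fuel (d + 2 - (d + 2) / 2)).flatMap
          (fun x => (pvConfigsGo widths fuel ((d + 2) / 2)).map (fun y => x ++ y)) = _
      have hsum : (d + 2 - (d + 2) / 2) + (d + 2) / 2 = d + 2 := by omega
      rw [ih _ (by omega), ih _ (by omega), ← pv_prodA_add, hsum]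

theorem pv_configs_eq (widths : List Int) (d : Nat) :
    pvConfigs widths d = pvProdA (List.replicate d widths) :=
  pv_configsGo_eq widths d d le_rfl

-- ===== VERDICT (by name: the statement is the Claim_ definition above) =====
theorem generate_configurations_spec : Claim_equal_generate_configurations := by
  intro min_depth max_depth widths _ _
  unfold Spec_generate_configurations generate_configurations generate_configurations_alt
  split
  · rfl
  · simp only [pv_configs_eq, List.map_id_fun', id]
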